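-- pv_equiv track=rewrite | github.com/ZIYUANLI-star/MutaKernel | scripts/pilot_wsl.py | pick_pilots
-- ===== SOURCE A (Python) =====
-- def pick_pilots(survived, n=5):
--     seen = set()
--     picked = []
--     for target in ["stab_remove", "cast_remove", "sync_remove", "arith_replace", "epsilon_modify"]:
--         if len(picked) >= n: break
--         for item in survived:
--             if item[2]["operator_name"] == target and target not in seen:
--                 picked.append(item); seen.add(target); break
--     for item in survived:
--         if len(picked) >= n: break
--         op = item[2]["operator_name"]
--         if op not in seen:
--             picked.append(item); seen.add(op)
--     return picked
-- ===== SOURCE B (Python) =====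
-- def pick_pilots(survived, n=5):
--     if n <= 0:
--         return []
--     priorities = ["stab_remove", "cast_remove", "sync_remove", "arith_replace", "epsilon_modify"]
--     # one pass: ordered map op -> first item carrying that operator (op may be None)
--     first = {}
--     for item in survived:
--         op = item[2].get("operator_name")
--         if op not in first:
--             first[op] = item
--     pri = [first[t] for t in priorities if t in first]
--     others = [item for op, item in first.items() if op not in priorities]
--     return (pri + others)[:n]
-- ===== Notes on version B (the rewrite author's own statement) =====
-- stated objective: simpler
-- what changed: One pass builds an ordered first-occurrence map op->item (via .get, so it never raises), then the result is assembled declaratively as priority picks plus remaining first occurrences, truncated to n - replacing A's five repeated scans with break/seen bookkeeping plus a rescan.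
-- outside the precondition, e.g. on pick_pilots([('c', 'd', {})], 1): A raises KeyError, B returns [('c', 'd', {})]
import Mathlib
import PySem

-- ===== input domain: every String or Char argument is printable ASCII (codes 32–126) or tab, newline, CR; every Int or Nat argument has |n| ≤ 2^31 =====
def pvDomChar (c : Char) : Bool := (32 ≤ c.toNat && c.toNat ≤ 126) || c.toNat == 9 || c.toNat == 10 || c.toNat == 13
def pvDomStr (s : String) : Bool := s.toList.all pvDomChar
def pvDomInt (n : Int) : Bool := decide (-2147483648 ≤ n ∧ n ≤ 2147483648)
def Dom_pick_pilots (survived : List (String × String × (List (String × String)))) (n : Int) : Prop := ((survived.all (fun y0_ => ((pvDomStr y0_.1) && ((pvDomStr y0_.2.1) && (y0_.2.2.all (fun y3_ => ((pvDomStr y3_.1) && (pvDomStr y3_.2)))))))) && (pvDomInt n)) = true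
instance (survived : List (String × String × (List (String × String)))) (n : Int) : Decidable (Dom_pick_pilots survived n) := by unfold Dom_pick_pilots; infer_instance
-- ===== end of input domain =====

-- B replaces A's five repeated scans of `survived` by one first-occurrence indexing pass (via dict.get, so B itself never raises) and a declarative assembly truncated to n (objective: simpler).


-- ===== PORT A =====
-- item[2]["operator_name"]; the "" default is only reachable outside Pre_ (Pre_ guarantees the key
-- is present on every item), where Python raises KeyError.
def pvOpName (item : String × String × (List (String × String))) : String :=
  (PySem.Dict.mk item.2.2).getD "operator_name" ""

def pvPriorities : List String :=
  ["stab_remove", "cast_remove", "sync_remove", "arith_replace", "epsilon_modify"]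

-- inner 'for item in survived: … break' of A's first loop
def pvScanA (target : String) (seen : PySem.Set String)
    (picked : List (String × String × (List (String × String)))) :
    List (String × String × (List (String × String))) →
      PySem.Set String × List (String × String × (List (String × String)))
  | [] => (seen, picked)
  | item :: rest =>
    if pvOpName item == target && !(seen.contains target) then
      (seen.add target, picked ++ [item])
    else pvScanA target seen picked rest

-- A's first loop, over the priority targets
def pvLoop1A (n : Int) (survived : List (String × String × (List (String × String)))) :
    List String → PySem.Set String → List (String × String × (List (String × String))) →
      PySem.Set String × List (String × String × (List (String × String)))
  | [], seen, picked => (seen, picked)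
  | t :: ts, seen, picked =>
    if n ≤ (picked.length : Int) then (seen, picked)
    else
      let sp := pvScanA t seen picked survived
      pvLoop1A n survived ts sp.1 sp.2

-- A's second loop, over survived
def pvLoop2A (n : Int) :
    List (String × String × (List (String × String))) → PySem.Set String →
      List (String × String × (List (String × String))) →
      List (String × String × (List (String × String)))
  | [], _, picked => picked
  | item :: rest, seen, picked =>
    if n ≤ (picked.length : Int) then picked
    else
      let op := pvOpName item
      if !(seen.contains op) then pvLoop2A n rest (seen.add op) (picked ++ [item])
      else pvLoop2A n rest seen picked

def pick_pilots (survived : List (String × String × (List (String × String)))) (n : Int) :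
    List (String × String × (List (String × String))) :=
  let sp := pvLoop1A n survived pvPriorities PySem.Set.empty []
  pvLoop2A n survived sp.1 sp.2

-- ===== PORT B =====
-- op = item[2].get("operator_name") : may be None, so the index key type is Option String
def pvOpGet (item : String × String × (List (String × String))) : Option String :=
  (PySem.Dict.mk item.2.2).get? "operator_name"

def pvPrioritiesB : List String :=
  ["stab_remove", "cast_remove", "sync_remove", "arith_replace", "epsilon_modify"]

-- B's single indexing pass: first = {}; for item in survived: if op not in first: first[op] = item
def pvIndexB : List (String × String × (List (String × String))) →
    PySem.Dict (Option String) (String × String × (List (String × String))) →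
    PySem.Dict (Option String) (String × String × (List (String × String)))
  | [], first => first
  | item :: rest, first =>
    let op := pvOpGet item
    pvIndexB rest (if first.contains op then first else first.insert op item)

def pick_pilots_alt (survived : List (String × String × (List (String × String)))) (n : Int) :
    List (String × String × (List (String × String))) :=
  if n ≤ 0 then []
  else
    let first := pvIndexB survived PySem.Dict.empty
    -- [first[t] for t in priorities if t in first]
    let pri := pvPrioritiesB.filterMap (fun t => first.get? (some t))
    -- [item for op, item in first.items() if op not in priorities]  (op may be None, never in the list)
    let others := (first.items.filter
      (fun p => !((pvPrioritiesB.map (fun t => some t)).contains p.1))).map (fun p => p.2)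
    -- (pri + others)[:n] — exact as take since n ≥ 1 on this branch
    (pri ++ others).take n.toNat

-- ===== PRECONDITION & SPEC =====
-- Pre_ excludes inputs (with n ≥ 1) in which some item lacks the "operator_name" key: on those the
-- Python A raises KeyError whenever one of its scans reaches such an item, while B (using .get)
-- always returns; on the excluded inputs where A does return (missing keys only past the prefix A
-- scans), B returns the very same value — Pre_ is kept closed-form rather than describing A's
-- scanned prefix.
def Pre_pick_pilots (survived : List (String × String × (List (String × String)))) (n : Int) : Prop :=
  n ≤ 0 ∨ ∀ item ∈ survived, ((PySem.Dict.mk item.2.2).get? "operator_name").isSome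
instance (survived : List (String × String × (List (String × String)))) (n : Int) : Decidable (Pre_pick_pilots survived n) := by unfold Pre_pick_pilots; infer_instance

def pvWitness_pick_pilots : (List (String × String × (List (String × String)))) × Int :=
  ([("a", "b", [("operator_name", "cast_remove")]), ("c", "d", [("operator_name", "foo")])], 1)

def Spec_pick_pilots (survived : List (String × String × (List (String × String)))) (n : Int) (out : List (String × String × (List (String × String)))) : Prop := out = pick_pilots_alt survived n
instance (survived : List (String × String × (List (String × String)))) (n : Int) (out : List (String × String × (List (String × String)))) : Decidable (Spec_pick_pilots survived n out) := by unfold Spec_pick_pilots; infer_instance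

-- ===== CLAIM (what is proved, stated in full; the proofs are below) =====
def Claim_equal_pick_pilots : Prop := ∀ (survived : List (String × String × (List (String × String)))) (n : Int), Dom_pick_pilots survived n → Pre_pick_pilots survived n → Spec_pick_pilots survived n (pick_pilots survived n)

-- ===== LEMMAS AND PROOFS =====

-- local abbreviation for the item type (proof-side only)
abbrev PvItem := String × String × (List (String × String))

-- proof-side view of A's first loop: lookups in a first-occurrence index instead of scans
def pvLoop1B (n : Int) (first : PySem.Dict String PvItem) :
    List String → PySem.Set String → List PvItem → PySem.Set String × List PvItem
  | [], seen, picked => (seen, picked)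
  | t :: ts, seen, picked =>
    if n ≤ (picked.length : Int) then (seen, picked)
    else
      match first.get? t with
      | some item => pvLoop1B n first ts (seen.add t) (picked ++ [item])
      | none => pvLoop1B n first ts seen picked

-- proof-side view of A's second loop: walk the first-occurrence pairs
def pvLoop2B (n : Int) (seen : PySem.Set String) :
    List (String × PvItem) → List PvItem → List PvItem
  | [], picked => picked
  | (op, item) :: rest, picked =>
    if n ≤ (picked.length : Int) then picked
    else if !(seen.contains op) then pvLoop2B n seen rest (picked ++ [item])
    else pvLoop2B n seen rest picked

-- proof-side String-keyed first-occurrence index (mirrors pvIndexB under Pre_)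
def pvFirstB : List PvItem → PySem.Dict String PvItem → PySem.Dict String PvItem
  | [], first => first
  | item :: rest, first =>
    let op := pvOpName item
    pvFirstB rest (if first.contains op then first else first.insert op item)

-- Python-set fact specialised to our ports: membership after add
theorem pvSet_contains_add (s : PySem.Set String) (x y : String) :
    (s.add x).contains y = (s.contains y || y == x) := by
  simp [PySem.Set.contains_eq_listContains, List.contains_eq_mem, PySem.Set.mem_add,
    beq_eq_decide]

-- A's inner scan is the first match (if the target is not yet seen)
theorem pvScanA_eq (t : String) (seen : PySem.Set String) (picked : List PvItem)
    (xs : List PvItem) (h : seen.contains t = false) :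
    pvScanA t seen picked xs =
      match xs.find? (fun it => pvOpName it == t) with
      | none => (seen, picked)
      | some it => (seen.add t, picked ++ [it]) := by
  induction xs with
  | nil => rfl
  | cons item rest ih =>
    have h' : ¬ t ∈ seen := by
      simpa [PySem.Set.contains_eq_listContains, List.contains_eq_mem] using h
    by_cases hop : pvOpName item == t
    · simp [pvScanA, hop, h', List.find?]
    · simp only [Bool.not_eq_true] at hop
      simp [pvScanA, hop, List.find?, ih]

-- the index lookup is the first match
theorem pvFirstB_get? (xs : List PvItem)
    (d : PySem.Dict String PvItem) (t : String) :
    (pvFirstB xs d).get? t = (d.get? t).or (xs.find? (fun it => pvOpName it == t)) := by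
  induction xs generalizing d with
  | nil => simp [pvFirstB]
  | cons item rest ih =>
    simp only [pvFirstB]
    by_cases hc : d.contains (pvOpName item)
    · simp only [hc, if_pos]
      rw [ih]
      by_cases ht : pvOpName item == t
      · have : d.contains t = true := by rwa [eq_of_beq ht] at hc
        rw [PySem.Dict.contains_eq_isSome_get?] at this
        cases hdt : d.get? t with
        | some v => simp [List.find?, ht]
        | none => rw [hdt] at this; simp at this
      · simp [List.find?, ht]
    · simp only [hc, if_neg, Bool.false_eq_true, not_false_iff]
      rw [ih]
      by_cases ht : pvOpName item == t
      · have hteq : t = pvOpName item := (eq_of_beq ht).symm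
        have hdt : d.get? t = none := by
          rw [hteq]
          rw [PySem.Dict.contains_eq_isSome_get?] at hc
          cases h : d.get? (pvOpName item) with
          | none => rfl
          | some v => rw [h] at hc; simp at hc
        rw [PySem.Dict.get?_insert, if_pos hteq, hdt]
        simp [List.find?, ht]
      · have hne : t ≠ pvOpName item := fun he => ht (by simp [he])
        rw [PySem.Dict.get?_insert, if_neg hne]
        simp [List.find?, ht]

-- the two first loops agree
theorem pvLoop1_eq (n : Int) (survived : List PvItem) :
    ∀ (ts : List String) (seen : PySem.Set String) (picked : List PvItem),
      ts.Nodup → (∀ t ∈ ts, seen.contains t = false) →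
      pvLoop1A n survived ts seen picked =
        pvLoop1B n (pvFirstB survived PySem.Dict.empty) ts seen picked := by
  intro ts
  induction ts with
  | nil => intro seen picked _ _; rfl
  | cons t rest ih =>
    intro seen picked hnd hts
    simp only [pvLoop1A, pvLoop1B]
    by_cases hn : n ≤ (picked.length : Int)
    · simp [hn]
    · simp only [hn, if_neg, not_false_iff]
      have hseen : seen.contains t = false := hts t (by simp)
      have hget : (pvFirstB survived PySem.Dict.empty).get? t
          = survived.find? (fun it => pvOpName it == t) := by
        rw [pvFirstB_get?, PySem.Dict.get?_empty, Option.none_or]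
      rw [pvScanA_eq t seen picked survived hseen]
      cases hf : survived.find? (fun it => pvOpName it == t) with
      | none =>
        rw [hget, hf]
        exact ih seen picked hnd.of_cons (fun t' ht' => hts t' (by simp [ht']))
      | some item =>
        rw [hget, hf]
        refine ih (seen.add t) (picked ++ [item]) hnd.of_cons ?_
        intro t' ht'
        rw [pvSet_contains_add, hts t' (by simp [ht'])]
        have : t' ≠ t := by
          intro he; subst he
          exact (List.nodup_cons.mp hnd).1 ht'
        simp [this]

-- first-occurrence list of (op, item) pairs, in order (proof-side view of the index)
def pvFirstOcc : List PvItem → List (String × PvItem)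
  | [] => []
  | it :: rest =>
      (pvOpName it, it) :: pvFirstOcc (rest.filter (fun j => !(pvOpName j == pvOpName it)))
termination_by xs => xs.length
decreasing_by
  simp only [List.length_cons, List.length_unattach]
  exact Nat.lt_succ_of_le ((List.length_filter_le _ _).trans (le_of_eq (List.length_attach)))

theorem pvFirstB_items (xs : List PvItem) :
    ∀ (d : PySem.Dict String PvItem),
      (pvFirstB xs d).items =
        d.items ++ pvFirstOcc (xs.filter (fun j => !(d.contains (pvOpName j)))) := by
  induction xs with
  | nil => intro d; rw [pvFirstB, List.filter_nil, pvFirstOcc.eq_1]; simp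
  | cons item rest ih =>
    intro d
    simp only [pvFirstB]
    by_cases hc : d.contains (pvOpName item)
    · simp only [hc, if_pos, List.filter_cons, Bool.not_true, Bool.false_eq_true, if_neg,
        not_false_iff]
      exact ih d
    · simp only [hc, if_neg, Bool.false_eq_true, not_false_iff]
      rw [ih]
      have hc' : d.contains (pvOpName item) = false := by simpa using hc
      rw [PySem.Dict.items_insert_of_not_contains d item hc']
      have hfil : rest.filter (fun j => !((d.insert (pvOpName item) item).contains (pvOpName j)))
          = (rest.filter (fun j => !(d.contains (pvOpName j)))).filter
              (fun j => !(pvOpName j == pvOpName item)) := by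
        rw [List.filter_filter]
        apply List.filter_congr
        intro j _
        rw [PySem.Dict.contains_insert]
        cases pvOpName j == pvOpName item <;> cases d.contains (pvOpName j) <;> rfl
      rw [hfil]
      have : ((item :: rest).filter (fun j => !(d.contains (pvOpName j))))
          = item :: rest.filter (fun j => !(d.contains (pvOpName j))) := by
        have hc' : d.contains (pvOpName item) = false := by simpa using hc
        simp [hc']
      rw [this]
      conv_rhs => rw [pvFirstOcc.eq_2]
      simp

-- every key produced by pvFirstOcc is an operator name of the list
theorem pvFirstOcc_fst_mem_aux :
    ∀ (m : Nat) (xs : List PvItem), xs.length ≤ m →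
      ∀ p ∈ pvFirstOcc xs, p.1 ∈ xs.map pvOpName := by
  intro m
  induction m with
  | zero =>
    intro xs hlen p hp
    cases xs with
    | nil => rw [pvFirstOcc.eq_1] at hp; simp at hp
    | cons it rest => simp at hlen
  | succ m ih =>
    intro xs hlen p hp
    cases xs with
    | nil => rw [pvFirstOcc.eq_1] at hp; simp at hp
    | cons it rest =>
      rw [pvFirstOcc.eq_2] at hp
      rcases List.mem_cons.mp hp with h | h
      · subst h; simp
      · have hlen' : (rest.filter (fun j => !(pvOpName j == pvOpName it))).length ≤ m :=
          le_trans (List.length_filter_le _ _) (by simpa using hlen)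
        have := ih _ hlen' p h
        rcases List.mem_map.mp this with ⟨j, hj, hje⟩
        have hj' : j ∈ rest := List.mem_of_mem_filter hj
        exact List.mem_map.mpr ⟨j, List.mem_cons_of_mem _ hj', hje⟩

theorem pvFirstOcc_fst_mem (xs : List PvItem) (p : String × PvItem) (hp : p ∈ pvFirstOcc xs) :
    p.1 ∈ xs.map pvOpName :=
  pvFirstOcc_fst_mem_aux xs.length xs (le_refl _) p hp

-- A's second loop ignores items whose operator is already seen
theorem pvLoop2A_filter (n : Int) (op : String) :
    ∀ (xs : List PvItem) (seen : PySem.Set String) (picked : List PvItem),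
      seen.contains op = true →
      pvLoop2A n xs seen picked =
        pvLoop2A n (xs.filter (fun j => !(pvOpName j == op))) seen picked := by
  intro xs
  induction xs with
  | nil => intro seen picked _; rfl
  | cons item rest ih =>
    intro seen picked hop
    by_cases hn : n ≤ (picked.length : Int)
    · cases hf : (item :: rest).filter (fun j => !(pvOpName j == op)) with
      | nil => simp [pvLoop2A, hn]
      | cons a l => simp [pvLoop2A, hn]
    · by_cases hje : pvOpName item == op
      · have hseen : seen.contains (pvOpName item) = true := by rwa [eq_of_beq hje]
        simp only [List.filter_cons, hje, Bool.not_true, Bool.false_eq_true, if_neg,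
          not_false_iff]
        rw [pvLoop2A]
        simp only [hn, if_neg, not_false_iff, hseen, Bool.not_true, Bool.false_eq_true,
          if_neg]
        exact ih seen picked hop
      · simp only [Bool.not_eq_true] at hje
        simp only [List.filter_cons, hje, Bool.not_false, if_pos]
        rw [pvLoop2A, pvLoop2A]
        simp only [hn, if_neg, not_false_iff]
        by_cases hs : seen.contains (pvOpName item)
        · simp only [hs, Bool.not_true, Bool.false_eq_true, if_neg, not_false_iff]
          exact ih seen picked hop
        · simp only [Bool.not_eq_true] at hs
          simp only [hs, Bool.not_false, if_pos]
          refine ih (seen.add (pvOpName item)) (picked ++ [item]) ?_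
          rw [pvSet_contains_add, hop]
          simp

-- the walk only queries `seen` at the keys of its list
theorem pvLoop2B_congr (n : Int) :
    ∀ (l : List (String × PvItem)) (s1 s2 : PySem.Set String) (picked : List PvItem),
      (∀ p ∈ l, s1.contains p.1 = s2.contains p.1) →
      pvLoop2B n s1 l picked = pvLoop2B n s2 l picked := by
  intro l
  induction l with
  | nil => intro s1 s2 picked _; rfl
  | cons p rest ih =>
    intro s1 s2 picked h
    obtain ⟨op, item⟩ := p
    rw [pvLoop2B, pvLoop2B]
    have hop : s1.contains op = s2.contains op := h (op, item) (by simp)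
    rw [hop]
    by_cases hn : n ≤ (picked.length : Int)
    · simp [hn]
    · simp only [hn, if_neg, not_false_iff]
      by_cases hs : s2.contains op
      · simp only [hs, Bool.not_true, Bool.false_eq_true, if_neg, not_false_iff]
        exact ih s1 s2 picked (fun q hq => h q (by simp [hq]))
      · simp only [Bool.not_eq_true] at hs
        simp only [hs, Bool.not_false, if_pos]
        exact ih s1 s2 (picked ++ [item]) (fun q hq => h q (by simp [hq]))

-- A's second loop is the walk over the first-occurrence pairs
theorem pvLoop2_eq_aux (n : Int) :
    ∀ (m : Nat) (xs : List PvItem), xs.length ≤ m →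
      ∀ (seen : PySem.Set String) (picked : List PvItem),
        pvLoop2A n xs seen picked = pvLoop2B n seen (pvFirstOcc xs) picked := by
  intro m
  induction m with
  | zero =>
    intro xs hlen seen picked
    cases xs with
    | nil => rw [pvFirstOcc.eq_1]; rfl
    | cons it rest => simp at hlen
  | succ m ihm =>
    intro xs hlen seen picked
    cases xs with
    | nil => rw [pvFirstOcc.eq_1]; rfl
    | cons item rest =>
    have ih : ∀ (seen : PySem.Set String) (picked : List PvItem),
        pvLoop2A n (rest.filter (fun j => !(pvOpName j == pvOpName item))) seen picked
          = pvLoop2B n seen (pvFirstOcc (rest.filter (fun j => !(pvOpName j == pvOpName item)))) picked :=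
      fun seen picked =>
        ihm _ (le_trans (List.length_filter_le _ _) (by simpa using hlen)) seen picked
    rw [pvFirstOcc.eq_2, pvLoop2A, pvLoop2B]
    by_cases hn : n ≤ (picked.length : Int)
    · simp [hn]
    · simp only [hn, if_neg, not_false_iff]
      by_cases hs : seen.contains (pvOpName item)
      · simp only [hs, Bool.not_true, Bool.false_eq_true, if_neg, not_false_iff]
        rw [pvLoop2A_filter n (pvOpName item) rest seen picked hs]
        exact ih seen picked
      · simp only [Bool.not_eq_true] at hs
        simp only [hs, Bool.not_false, if_pos]
        rw [pvLoop2A_filter n (pvOpName item) rest (seen.add (pvOpName item)) (picked ++ [item])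
          (by rw [pvSet_contains_add]; simp)]
        rw [ih (seen.add (pvOpName item)) (picked ++ [item])]
        apply pvLoop2B_congr
        intro p hp
        rw [pvSet_contains_add]
        have hmem := pvFirstOcc_fst_mem _ p hp
        have : p.1 ≠ pvOpName item := by
          intro he
          rcases List.mem_map.mp hmem with ⟨j, hj, hje⟩
          have := List.of_mem_filter hj
          rw [hje, he] at this
          simp at this
        simp [this]

theorem pvLoop2_eq (n : Int) (xs : List PvItem) (seen : PySem.Set String)
    (picked : List PvItem) :
    pvLoop2A n xs seen picked = pvLoop2B n seen (pvFirstOcc xs) picked :=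
  pvLoop2_eq_aux n xs.length xs (le_refl _) seen picked

theorem pvLoop2A_of_le (n : Int) (xs : List PvItem) (seen : PySem.Set String)
    (picked : List PvItem) (h : n ≤ (picked.length : Int)) :
    pvLoop2A n xs seen picked = picked := by
  cases xs with
  | nil => rfl
  | cons a l => simp [pvLoop2A, h]

-- NEW: picked-part of the first loop is a truncated filterMap
theorem pvLoop1B_snd (n : Int) (first : PySem.Dict String PvItem) :
    ∀ (ts : List String) (seen : PySem.Set String) (picked : List PvItem),
      (pvLoop1B n first ts seen picked).2 =
        picked ++ (ts.filterMap first.get?).take ((n - picked.length).toNat) := by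
  intro ts
  induction ts with
  | nil => intro seen picked; simp [pvLoop1B]
  | cons t ts ih =>
    intro seen picked
    simp only [pvLoop1B]
    by_cases hn : n ≤ (picked.length : Int)
    · have h0 : (n - (picked.length : Int)).toNat = 0 := by omega
      simp [hn, h0]
    · simp only [hn, if_neg, not_false_iff]
      cases hg : first.get? t with
      | none => rw [ih]; simp [hg]
      | some item =>
        rw [ih]
        have h1 : (n - (picked.length : Int)).toNat
            = (n - ((picked ++ [item]).length : Int)).toNat + 1 := by
          simp only [List.length_append, List.length_cons, List.length_nil]
          omega
        rw [h1]
        simp [hg, List.take_succ_cons]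

-- NEW: if the first loop did not fill up, its seen-set is priorities-present-in-first
theorem pvLoop1B_fst (n : Int) (first : PySem.Dict String PvItem) :
    ∀ (ts : List String) (seen : PySem.Set String) (picked : List PvItem),
      ((pvLoop1B n first ts seen picked).2.length : Int) < n →
      ∀ x, x ∈ (pvLoop1B n first ts seen picked).1 ↔
        x ∈ seen ∨ (x ∈ ts ∧ (first.get? x).isSome) := by
  intro ts
  induction ts with
  | nil => intro seen picked _ x; simp [pvLoop1B]
  | cons t ts ih =>
    intro seen picked h x
    by_cases hn : n ≤ (picked.length : Int)
    · simp only [pvLoop1B, hn, if_pos] at h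
      exact absurd h (by omega)
    · simp only [pvLoop1B, hn, if_neg, not_false_iff] at h ⊢
      cases hg : first.get? t with
      | none =>
        rw [hg] at h
        dsimp only at h ⊢
        rw [ih seen picked h x]
        by_cases hx : x = t
        · subst hx; simp [hg]
        · simp [List.mem_cons, hx]
      | some item =>
        rw [hg] at h
        dsimp only at h ⊢
        rw [ih (seen.add t) (picked ++ [item]) h x]
        by_cases hx : x = t
        · subst hx; simp [hg, PySem.Set.mem_add]
        · simp only [PySem.Set.mem_add, List.mem_cons]
          constructor
          · rintro ((hs | he) | hts)
            · exact Or.inl hs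
            · exact absurd he hx
            · exact Or.inr ⟨Or.inr hts.1, hts.2⟩
          · rintro (hs | ⟨(he | hts), hsome⟩)
            · exact Or.inl (Or.inl hs)
            · exact absurd he hx
            · exact Or.inr ⟨hts, hsome⟩

-- NEW: the walk is a truncated filtered map
theorem pvLoop2B_take (n : Int) (seen : PySem.Set String) :
    ∀ (l : List (String × PvItem)) (picked : List PvItem),
      pvLoop2B n seen l picked =
        picked ++ ((l.filter (fun p => !(seen.contains p.1))).map (fun p => p.2)).take
          ((n - picked.length).toNat) := by
  intro l
  induction l with
  | nil => intro picked; simp [pvLoop2B]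
  | cons p l ih =>
    intro picked
    obtain ⟨op, item⟩ := p
    rw [pvLoop2B]
    by_cases hn : n ≤ (picked.length : Int)
    · have h0 : (n - (picked.length : Int)).toNat = 0 := by omega
      simp [hn, h0]
    · simp only [hn, if_neg, not_false_iff]
      by_cases hs : seen.contains op
      · simp only [hs, Bool.not_true, Bool.false_eq_true, if_neg, not_false_iff]
        have hmem : op ∈ seen := by
          simpa [PySem.Set.contains_eq_listContains, List.contains_eq_mem] using hs
        rw [ih, List.filter_cons, if_neg (by simp [hmem])]
      · simp only [Bool.not_eq_true] at hs
        simp only [hs, Bool.not_false, if_pos]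
        have h1 : (n - (picked.length : Int)).toNat
            = (n - ((picked ++ [item]).length : Int)).toNat + 1 := by
          simp only [List.length_append, List.length_cons, List.length_nil]
          omega
        have hmem : op ∉ seen := by
          simpa [PySem.Set.contains_eq_listContains, List.contains_eq_mem] using hs
        rw [ih, List.filter_cons, if_pos (by simp [hmem]), h1]
        simp [List.take_succ_cons]

-- NEW: keys of the String-keyed index stay distinct
theorem pvFirstB_nodup_keys (xs : List PvItem) :
    ∀ (d : PySem.Dict String PvItem), d.keys.Nodup → (pvFirstB xs d).keys.Nodup := by
  induction xs with
  | nil => intro d h; exact h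
  | cons item rest ih =>
    intro d h
    simp only [pvFirstB]
    by_cases hc : d.contains (pvOpName item)
    · simp only [hc, if_pos]; exact ih d h
    · simp only [hc, if_neg, Bool.false_eq_true, not_false_iff]
      exact ih _ (PySem.Dict.nodup_keys_insert _ _ _ h)

-- NEW: Option-keyed lookup through the key injection
theorem pvGet_map_some (l : List (String × PvItem)) (t : String) :
    (PySem.Dict.mk (l.map (fun p => (some p.1, p.2)))).get? (some t)
      = (PySem.Dict.mk l).get? t := by
  induction l with
  | nil => rfl
  | cons p l ih =>
    simp only [List.map_cons]
    rw [PySem.Dict.get?_mk_cons, PySem.Dict.get?_mk_cons]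
    by_cases h : p.1 = t
    · simp [h]
    · simp [h, ih]

-- NEW: under Pre_, B's Option-keyed index is the String-keyed index with keys wrapped in `some`
theorem pvIndexB_items (xs : List PvItem)
    (hx : ∀ item ∈ xs, ((PySem.Dict.mk item.2.2).get? "operator_name").isSome) :
    ∀ (dS : PySem.Dict String PvItem) (dO : PySem.Dict (Option String) PvItem),
      dO.items = dS.items.map (fun p => (some p.1, p.2)) →
      (pvIndexB xs dO).items = (pvFirstB xs dS).items.map (fun p => (some p.1, p.2)) := by
  induction xs with
  | nil => intro dS dO h; exact h
  | cons item rest ih =>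
    intro dS dO h
    have hxi := hx item (by simp)
    have hop : pvOpGet item = some (pvOpName item) := by
      unfold pvOpGet pvOpName
      cases hg : (PySem.Dict.mk item.2.2).get? "operator_name" with
      | none => rw [hg] at hxi; simp at hxi
      | some v => simp [PySem.Dict.getD_eq_get?_getD, hg]
    have hOm : dO = PySem.Dict.mk (dS.items.map (fun p => ((some p.1 : Option String), p.2))) :=
      PySem.Dict.ext (by simpa using h)
    have hget : dO.get? (some (pvOpName item)) = dS.get? (pvOpName item) := by
      rw [hOm, pvGet_map_some]
    have hcont : dO.contains (pvOpGet item) = dS.contains (pvOpName item) := by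
      rw [hop, PySem.Dict.contains_eq_isSome_get?, PySem.Dict.contains_eq_isSome_get?, hget]
    simp only [pvIndexB, pvFirstB, hcont]
    by_cases hc : dS.contains (pvOpName item)
    · simp only [hc, if_pos]
      exact ih (fun i hi => hx i (by simp [hi])) dS dO h
    · simp only [hc, if_neg, Bool.false_eq_true, not_false_iff]
      refine ih (fun i hi => hx i (by simp [hi])) (dS.insert (pvOpName item) item)
        (dO.insert (pvOpGet item) item) ?_
      have hcS : dS.contains (pvOpName item) = false := by simpa using hc
      have hcO : dO.contains (pvOpGet item) = false := by rw [hcont]; exact hcS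
      rw [PySem.Dict.items_insert_of_not_contains _ _ hcO,
        PySem.Dict.items_insert_of_not_contains _ _ hcS, h, hop]
      simp

theorem pick_pilots_eq (survived : List PvItem) (n : Int)
    (hpre : n ≤ 0 ∨ ∀ item ∈ survived, ((PySem.Dict.mk item.2.2).get? "operator_name").isSome) :
    pick_pilots survived n = pick_pilots_alt survived n := by
  by_cases hn : n ≤ 0
  · have h1 : pvLoop1A n survived pvPriorities PySem.Set.empty [] = (PySem.Set.empty, []) := by
      simp [pvPriorities, pvLoop1A, hn]
    rw [pick_pilots, pick_pilots_alt, if_pos hn, h1]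
    exact pvLoop2A_of_le n survived _ [] (by simpa using hn)
  · have hx : ∀ item ∈ survived, ((PySem.Dict.mk item.2.2).get? "operator_name").isSome :=
      hpre.resolve_left hn
    rw [pick_pilots, pick_pilots_alt, if_neg hn]
    dsimp only
    have hO : (pvIndexB survived PySem.Dict.empty).items
        = (pvFirstB survived PySem.Dict.empty).items.map (fun p => ((some p.1 : Option String), p.2)) :=
      pvIndexB_items survived hx PySem.Dict.empty PySem.Dict.empty rfl
    have hOd : pvIndexB survived PySem.Dict.empty
        = PySem.Dict.mk ((pvFirstB survived PySem.Dict.empty).items.map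
            (fun p => ((some p.1 : Option String), p.2))) :=
      PySem.Dict.ext (by simpa using hO)
    have hpri : pvPrioritiesB.filterMap (fun t => (pvIndexB survived PySem.Dict.empty).get? (some t))
        = pvPriorities.filterMap (pvFirstB survived PySem.Dict.empty).get? := by
      apply List.filterMap_congr
      intro t _
      rw [hOd, pvGet_map_some]
    have hoth : ((pvIndexB survived PySem.Dict.empty).items.filter
          (fun p => !((pvPrioritiesB.map (fun t => some t)).contains p.1))).map (fun p => p.2)
        = ((pvFirstB survived PySem.Dict.empty).items.filter
            (fun p => !(pvPriorities.contains p.1))).map (fun p => p.2) := by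
      rw [hO, List.filter_map, List.map_map]
      have hpred : ∀ p : String × PvItem,
          ((fun p : Option String × PvItem => !((pvPrioritiesB.map (fun t => some t)).contains p.1))
            ∘ (fun p : String × PvItem => ((some p.1 : Option String), p.2))) p
          = (fun p : String × PvItem => !(pvPriorities.contains p.1)) p := by
        intro p
        simp [Function.comp, List.contains_eq_mem, pvPriorities, pvPrioritiesB]
      rw [List.filter_congr (fun p _ => hpred p)]
      rfl
    rw [hpri, hoth]
    rw [pvLoop1_eq n survived pvPriorities PySem.Set.empty [] (by decide) (fun t _ => rfl)]
    rw [pvLoop2_eq]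
    have hocc : pvFirstOcc survived = (pvFirstB survived PySem.Dict.empty).items := by
      rw [pvFirstB_items survived PySem.Dict.empty]
      simp [PySem.Dict.empty]
    rw [hocc]
    set firstS := pvFirstB survived PySem.Dict.empty with hFS
    set pri := pvPriorities.filterMap firstS.get? with hpridef
    set P := pvLoop1B n firstS pvPriorities PySem.Set.empty [] with hP
    have hsnd : P.2 = pri.take n.toNat := by
      rw [hP, pvLoop1B_snd]
      simp [hpridef]
    rw [pvLoop2B_take]
    by_cases hbig : n ≤ (pri.length : Int)
    · have hlen2 : P.2.length = n.toNat := by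
        rw [hsnd, List.length_take]
        omega
      have h0 : (n - (P.2.length : Int)).toNat = 0 := by omega
      rw [h0, List.take_zero, List.append_nil, List.take_append, hsnd]
      have h1 : n.toNat - pri.length = 0 := by omega
      rw [h1, List.take_zero, List.append_nil]
    · have hple : pri.length ≤ n.toNat := by omega
      have hp2 : P.2 = pri := by rw [hsnd]; exact List.take_of_length_le hple
      have hlt : ((P.2.length : Int)) < n := by rw [hp2]; omega
      have hfil : firstS.items.filter (fun p => !(P.1.contains p.1))
          = firstS.items.filter (fun p => !(pvPriorities.contains p.1)) := by
        apply List.filter_congr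
        intro p hp
        have hndk : firstS.keys.Nodup :=
          pvFirstB_nodup_keys survived PySem.Dict.empty (PySem.Dict.nodup_keys_empty)
        have hg : firstS.get? p.1 = some p.2 := by
          have : (p.1, p.2) ∈ firstS.items := by simpa using hp
          exact PySem.Dict.get?_of_mem_items _ this hndk
        have hmem := pvLoop1B_fst n firstS pvPriorities PySem.Set.empty [] hlt p.1
        have hcb : P.1.contains p.1 = pvPriorities.contains p.1 := by
          rw [PySem.Set.contains_eq_listContains, List.contains_eq_mem, List.contains_eq_mem]
          rw [← hP] at hmem
          simp only [hmem, hg, Option.isSome_some, and_true]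
          simp [PySem.Set.empty]
        rw [hcb]
      rw [hfil, hp2, List.take_append, List.take_of_length_le hple]
      have h2 : n.toNat - pri.length = (n - (pri.length : Int)).toNat := by omega
      rw [h2]

-- ===== VERDICT (by name: the statement is the Claim_ definition above) =====
theorem pick_pilots_spec : Claim_equal_pick_pilots := by
  intro survived n _ hpre
  unfold Spec_pick_pilots
  exact pick_pilots_eq survived n hpre
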